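-- pv_equiv track=rewrite | github.com/xfrbt1/Genetic_simulation | food/food_density.py | zones_counter
-- ===== SOURCE A (Python) =====
-- def zones_counter(food_array):
--     zone1 = 0
--     zone2 = 0
--     zone3 = 0
--     zone4 = 0
--     for food in food_array:
--         if food[0] < 590 and food[1] < 360:
--             zone1 += 1
--         elif 590 < food[0] < 1080 and food[1] < 360:
--             zone2 += 1
--         elif food[0] < 590 and 360 < food[1] < 720:
--             zone3 += 1
--         elif 590 < food[0] < 1080 and 360 < food[1] < 720:
--             zone4 += 1
--     return [zone1, zone2, zone3, zone4]
-- ===== SOURCE B (Python) =====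
-- def zones_counter(food_array):
--     # Staged passes: one independent counting pass per zone.
--     # The four zone predicates are pairwise exclusive (x-bands x<590 and
--     # 590<x<1080 are disjoint, as are y-bands y<360 and 360<y<720), so
--     # counting each zone separately equals A's single-pass elif chain.
--     def in_left(x):
--         return x < 590
--
--     def in_right(x):
--         return 590 < x < 1080
--
--     def in_top(y):
--         return y < 360
--
--     def in_bottom(y):
--         return 360 < y < 720
--
--     def count(px, py):
--         return sum(1 for f in food_array if px(f[0]) and py(f[1]))
--
--     return [count(in_left, in_top), count(in_right, in_top),
--             count(in_left, in_bottom), count(in_right, in_bottom)]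
-- ===== Notes on version B (the rewrite author's own statement) =====
-- stated objective: alternative
-- what changed: Replaces A's single stateful pass with four mutually-exclusive elif branches and four scalar counters by four independent counting passes, one per zone predicate (sum of a generator per zone), correct because the zone predicates are pairwise disjoint.
import Mathlib
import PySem

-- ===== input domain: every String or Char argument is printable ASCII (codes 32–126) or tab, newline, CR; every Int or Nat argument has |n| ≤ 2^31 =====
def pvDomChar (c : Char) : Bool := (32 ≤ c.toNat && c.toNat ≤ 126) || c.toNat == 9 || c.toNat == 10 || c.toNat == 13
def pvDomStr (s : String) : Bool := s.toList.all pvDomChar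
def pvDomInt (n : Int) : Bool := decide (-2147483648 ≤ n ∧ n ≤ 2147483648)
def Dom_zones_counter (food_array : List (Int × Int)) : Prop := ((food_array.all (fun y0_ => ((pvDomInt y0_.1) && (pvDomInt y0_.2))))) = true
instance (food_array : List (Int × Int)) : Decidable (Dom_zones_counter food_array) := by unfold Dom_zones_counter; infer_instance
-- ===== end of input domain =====

-- B replaces A's single stateful pass (four-way elif, four counters) with four
-- independent counting passes, one per (disjoint) zone predicate (objective: alternative).

-- ===== PORT A =====
-- the four-counter fold, branch order exactly as in A
def zonesStep (s : Int × Int × Int × Int) (food : Int × Int) : Int × Int × Int × Int :=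
  if food.1 < 590 ∧ food.2 < 360 then (s.1 + 1, s.2.1, s.2.2.1, s.2.2.2)
  else if (590 < food.1 ∧ food.1 < 1080) ∧ food.2 < 360 then (s.1, s.2.1 + 1, s.2.2.1, s.2.2.2)
  else if food.1 < 590 ∧ (360 < food.2 ∧ food.2 < 720) then (s.1, s.2.1, s.2.2.1 + 1, s.2.2.2)
  else if (590 < food.1 ∧ food.1 < 1080) ∧ (360 < food.2 ∧ food.2 < 720) then (s.1, s.2.1, s.2.2.1, s.2.2.2 + 1)
  else s

def zones_counter (food_array : List (Int × Int)) : List Int :=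
  let s := food_array.foldl zonesStep (0, 0, 0, 0)
  [s.1, s.2.1, s.2.2.1, s.2.2.2]

-- ===== PORT B =====
-- the axis-band predicates of Source B
def inLeft (x : Int) : Bool := x < 590
def inRight (x : Int) : Bool := 590 < x && x < 1080
def inTop (y : Int) : Bool := y < 360
def inBottom (y : Int) : Bool := 360 < y && y < 720

-- one counting pass over the whole array (Source B's `sum(1 for f in ... if px(f[0]) and py(f[1]))`)
def zoneCount (px py : Int → Bool) (food_array : List (Int × Int)) : Int :=
  (food_array.countP (fun f => px f.1 && py f.2) : Nat)

def zones_counter_alt (food_array : List (Int × Int)) : List Int :=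
  [zoneCount inLeft inTop food_array, zoneCount inRight inTop food_array,
   zoneCount inLeft inBottom food_array, zoneCount inRight inBottom food_array]

-- ===== PRECONDITION & SPEC =====
def Spec_zones_counter (food_array : List (Int × Int)) (out : List Int) : Prop := out = zones_counter_alt food_array
instance (food_array : List (Int × Int)) (out : List Int) : Decidable (Spec_zones_counter food_array out) := by unfold Spec_zones_counter; infer_instance

-- ===== CLAIM (what is proved, stated in full; the proofs are below) =====
def Claim_equal_zones_counter : Prop := ∀ (food_array : List (Int × Int)), Dom_zones_counter food_array → Spec_zones_counter food_array (zones_counter food_array)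

-- ===== LEMMAS AND PROOFS =====
-- A's fold, started at an arbitrary accumulator, adds B's four zone counts componentwise.
theorem fold_char (l : List (Int × Int)) (a b c d : Int) :
    l.foldl zonesStep (a, b, c, d) =
      (a + zoneCount inLeft inTop l, b + zoneCount inRight inTop l,
       c + zoneCount inLeft inBottom l, d + zoneCount inRight inBottom l) := by
  induction l generalizing a b c d with
  | nil => simp [zoneCount]
  | cons hd tl ih =>
    obtain ⟨x, y⟩ := hd
    simp only [List.foldl_cons, zonesStep]
    split_ifs with h1 h2 h3 h4 <;>
      · rw [ih]
        refine Prod.ext ?_ (Prod.ext ?_ (Prod.ext ?_ ?_)) <;>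
          simp_all [zoneCount, inLeft, inRight, inTop, inBottom, List.countP_cons] <;> omega

theorem zones_counter_spec : Claim_equal_zones_counter := by
  intro l _
  unfold Spec_zones_counter zones_counter zones_counter_alt
  rw [fold_char]
  simp
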